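-- pv_equiv track=rewrite | github.com/mik11231/python | advent2020/Day6/day6_part2.py | count_all_yes
-- ===== SOURCE A (Python) =====
-- def count_all_yes(group_text: str) -> int:
--     """Return the count of questions every person in the group answered yes."""
--     people = [set(person) for person in group_text.strip().split("\n") if person]
--     if not people:
--         return 0
--     common = people[0]
--     for person_set in people[1:]:
--         common &= person_set
--     return len(common)
-- ===== SOURCE B (Python) =====
-- def count_all_yes(group_text: str) -> int:
--     """Return the count of questions every person in the group answered yes."""
--     counts = {}
--     n = 0
--     for person in group_text.strip().split("\n"):
--         if not person:
--             continue
--         n += 1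
--         for q in set(person):
--             counts[q] = counts.get(q, 0) + 1
--     return sum(1 for c in counts.values() if c == n)
-- ===== Notes on version B (the rewrite author's own statement) =====
-- stated objective: idiomatic
-- what changed: Replaces the running set-intersection fold with a single frequency-table pass: count in how many people each question appears, then count the questions whose frequency equals the number of people.
import Mathlib
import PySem

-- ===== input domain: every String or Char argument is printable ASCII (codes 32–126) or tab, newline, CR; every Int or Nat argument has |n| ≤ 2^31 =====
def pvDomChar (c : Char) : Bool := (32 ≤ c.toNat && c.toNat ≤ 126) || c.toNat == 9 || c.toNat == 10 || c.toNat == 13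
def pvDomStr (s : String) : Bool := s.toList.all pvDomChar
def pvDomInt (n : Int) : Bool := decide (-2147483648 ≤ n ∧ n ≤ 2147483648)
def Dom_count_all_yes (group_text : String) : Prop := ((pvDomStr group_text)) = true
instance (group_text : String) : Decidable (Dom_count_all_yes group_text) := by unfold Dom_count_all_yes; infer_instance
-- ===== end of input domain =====

-- B replaces A's running set-intersection with a per-question frequency table scanned once (idiomatic, same cost).

-- ===== PORT A =====
-- people = [set(person) for person in group_text.strip().split("\n") if person]; fold '&' over people; len
def count_all_yes (group_text : String) : Int :=
  let people := ((PySem.Chars.splitOn (PySem.Str.strip group_text).toList ['\n']).filter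
      (fun person => person ≠ [])).map (fun person => PySem.Set.ofList person)
  match people with
  | [] => (0 : Int)
  | first :: rest => PySem.Set.len (rest.foldl (fun common s => PySem.Set.inter common s) first)

-- ===== PORT B =====
-- one pass: counts[q] += 1 for each q in set(person), n = number of people; answer = #{c in counts.values | c = n}
def count_all_yes_alt (group_text : String) : Int :=
  let st := (PySem.Chars.splitOn (PySem.Str.strip group_text).toList ['\n']).foldl
      (fun (acc : PySem.Dict Char Int × Int) person =>
        if person = [] then acc
        else ((PySem.Set.ofList person).foldl (fun d q => d.modify q 0 (fun c => c + 1)) acc.1,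
              acc.2 + 1))
      (PySem.Dict.empty, (0 : Int))
  st.1.values.foldl (fun acc c => if c = st.2 then acc + 1 else acc) (0 : Int)

-- ===== PRECONDITION & SPEC =====
def Spec_count_all_yes (group_text : String) (out : Int) : Prop := out = count_all_yes_alt group_text
instance (group_text : String) (out : Int) : Decidable (Spec_count_all_yes group_text out) := by unfold Spec_count_all_yes; infer_instance

-- ===== CLAIM (what is proved, stated in full; the proofs are below) =====
def Claim_equal_count_all_yes : Prop := ∀ (group_text : String), Dom_count_all_yes group_text → Spec_count_all_yes group_text (count_all_yes group_text)

-- ===== LEMMAS AND PROOFS =====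

/-- the non-empty lines, as sets -/
def pvPersons (lines : List (List Char)) : List (PySem.Set Char) :=
  (lines.filter (fun person => person ≠ [])).map (fun person => PySem.Set.ofList person)

/-- B's per-person dictionary update -/
def pvUpd (d : PySem.Dict Char Int) (s : PySem.Set Char) : PySem.Dict Char Int :=
  s.foldl (fun d q => d.modify q 0 (fun c => c + 1)) d

theorem pvPersons_nodup (lines : List (List Char)) :
    ∀ s ∈ pvPersons lines, List.Nodup s := by
  intro s hs
  simp only [pvPersons, List.mem_map] at hs
  obtain ⟨p, -, rfl⟩ := hs
  exact PySem.Set.nodup_ofList p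

/-- B's guarded fold over the raw lines is the unguarded fold over the nonempty people. -/
theorem pvBfold (lines : List (List Char)) (d : PySem.Dict Char Int) (n : Int) :
    lines.foldl
      (fun (acc : PySem.Dict Char Int × Int) person =>
        if person = [] then acc
        else ((PySem.Set.ofList person).foldl (fun d q => d.modify q 0 (fun c => c + 1)) acc.1,
              acc.2 + 1)) (d, n)
    = ((pvPersons lines).foldl pvUpd d, n + ((pvPersons lines).length : Int)) := by
  induction lines generalizing d n with
  | nil => simp [pvPersons]
  | cons p rest ih =>
    by_cases h : p = []
    · simp only [List.foldl_cons, if_pos h]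
      rw [ih]
      simp [pvPersons, h]
    · simp only [List.foldl_cons, if_neg h]
      rw [ih]
      have hp : pvPersons (p :: rest) = PySem.Set.ofList p :: pvPersons rest := by
        simp [pvPersons, h]
      rw [hp]
      simp only [List.foldl_cons, List.length_cons, pvUpd, Prod.mk.injEq]
      refine ⟨by trivial, by push_cast; ring⟩

/-- the nested modify-fold is Counter of the flattened people -/
theorem pvCounts_eq (ps : List (PySem.Set Char)) :
    ps.foldl pvUpd PySem.Dict.empty = PySem.Dict.counter ps.flatten := by
  rw [PySem.Dict.counter_eq_foldl, List.foldl_flatten]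
  rfl

/-- sum(1 for c in l if c == n) as a countP -/
theorem pvSumIf (l : List Int) (n a : Int) :
    l.foldl (fun acc c => if c = n then acc + 1 else acc) a
      = a + (l.countP (fun c => c == n) : Int) := by
  induction l generalizing a with
  | nil => simp
  | cons c rest ih =>
    by_cases h : c = n <;> simp [h, ih] <;> ring

theorem pvInterFold_mem (rest : List (PySem.Set Char)) (s0 : PySem.Set Char) (x : Char) :
    x ∈ rest.foldl (fun common s => PySem.Set.inter common s) s0
      ↔ x ∈ s0 ∧ ∀ t ∈ rest, x ∈ t := by
  induction rest generalizing s0 with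
  | nil => simp
  | cons t rest ih =>
    simp only [List.foldl_cons, ih, PySem.Set.mem_inter, List.mem_cons]
    constructor
    · rintro ⟨⟨h0, ht⟩, hall⟩
      refine ⟨h0, ?_⟩
      rintro u (rfl | hu)
      · exact ht
      · exact hall u hu
    · rintro ⟨h0, hall⟩
      exact ⟨⟨h0, hall t (Or.inl rfl)⟩, fun u hu => hall u (Or.inr hu)⟩

theorem pvInterFold_nodup (rest : List (PySem.Set Char)) (s0 : PySem.Set Char)
    (h : List.Nodup s0) :
    List.Nodup (rest.foldl (fun common s => PySem.Set.inter common s) s0) := by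
  induction rest generalizing s0 with
  | nil => exact h
  | cons t rest ih => exact ih _ (PySem.Set.nodup_inter s0 t h)

theorem pvCount_flatten (ps : List (PySem.Set Char)) (h : ∀ s ∈ ps, List.Nodup s) (k : Char) :
    List.count k ps.flatten = ps.countP (fun s => decide (k ∈ s)) := by
  induction ps with
  | nil => simp
  | cons s rest ih =>
    have hs : List.count k s = if k ∈ s then 1 else 0 := by
      by_cases hk : k ∈ s
      · simp [hk, List.count_eq_one_of_mem (h s (by simp)) hk]
      · simp [hk, List.count_eq_zero.mpr hk]
    simp only [List.flatten_cons, List.count_append, List.countP_cons, hs]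
    rw [ih (fun t ht => h t (by simp [ht]))]
    by_cases hk : k ∈ s <;> simp [hk] <;> try omega

/-- the central counting argument, for a non-empty list of Nodup people -/
theorem pvMainCount (s0 : PySem.Set Char) (rest : List (PySem.Set Char))
    (h : ∀ s ∈ s0 :: rest, List.Nodup s) :
    ((PySem.Set.ofList (s0 :: rest).flatten).countP
        (fun k => ((List.count k (s0 :: rest).flatten : Int) == ((s0 :: rest).length : Int))) : Int)
      = PySem.Set.len (rest.foldl (fun common s => PySem.Set.inter common s) s0) := by
  set ps := s0 :: rest with hps
  set L := ps.flatten with hL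
  have hperm :
      ((PySem.Set.ofList L).filter
          (fun k => ((List.count k L : Int) == (ps.length : Int)))).Perm
        (rest.foldl (fun common s => PySem.Set.inter common s) s0) := by
    rw [List.perm_ext_iff_of_nodup
        ((PySem.Set.nodup_ofList L).filter _)
        (pvInterFold_nodup rest s0 (h s0 (by simp [hps])))]
    intro a
    rw [List.mem_filter, pvInterFold_mem, PySem.Set.mem_ofList]
    have hcnt : List.count a L = ps.countP (fun s => decide (a ∈ s)) := pvCount_flatten ps h a
    have hiff : ((List.count a L : Int) == (ps.length : Int)) = true ↔ ∀ s ∈ ps, a ∈ s := by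
      rw [beq_iff_eq, Int.natCast_inj, hcnt, List.countP_eq_length]
      simp
    constructor
    · rintro ⟨-, hb⟩
      have hall := hiff.mp hb
      exact ⟨hall s0 (by simp [hps]), fun t ht => hall t (by simp [hps, ht])⟩
    · rintro ⟨h0, hallr⟩
      have hall : ∀ s ∈ ps, a ∈ s := by
        rintro s hs
        rw [hps, List.mem_cons] at hs
        rcases hs with rfl | hs
        · exact h0
        · exact hallr s hs
      refine ⟨?_, hiff.mpr hall⟩
      rw [hL, List.mem_flatten]
      exact ⟨s0, by simp [hps], h0⟩
  have hlen := hperm.length_eq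
  rw [List.countP_eq_length_filter, hlen]
  rfl

/-- generalized equivalence over the list of lines -/
theorem pvMain (lines : List (List Char)) :
    (match (lines.filter (fun person => person ≠ [])).map (fun person => PySem.Set.ofList person) with
      | [] => (0 : Int)
      | first :: rest =>
          PySem.Set.len (rest.foldl (fun common s => PySem.Set.inter common s) first))
    = (let st := lines.foldl
          (fun (acc : PySem.Dict Char Int × Int) person =>
            if person = [] then acc
            else ((PySem.Set.ofList person).foldl (fun d q => d.modify q 0 (fun c => c + 1)) acc.1,
                  acc.2 + 1))
          (PySem.Dict.empty, (0 : Int));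
        st.1.values.foldl (fun acc c => if c = st.2 then acc + 1 else acc) (0 : Int)) := by
  simp only [pvBfold, pvCounts_eq]
  have hvals : (PySem.Dict.counter (pvPersons lines).flatten).values
      = (PySem.Set.ofList (pvPersons lines).flatten).map
          (fun k => (List.count k (pvPersons lines).flatten : Int)) := by
    have := PySem.Dict.items_counter (pvPersons lines).flatten
    calc (PySem.Dict.counter (pvPersons lines).flatten).values
        = (PySem.Dict.counter (pvPersons lines).flatten).items.map (fun x => x.2) := rfl
      _ = _ := by rw [this, List.map_map]; rfl
  rw [hvals, pvSumIf, List.countP_map]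
  cases hp : pvPersons lines with
  | nil =>
    have h0 : (lines.filter (fun person => person ≠ [])).map (fun person => PySem.Set.ofList person) = [] := hp
    rw [h0]
    simp
  | cons s0 rest =>
    have hmap : (lines.filter (fun person => person ≠ [])).map (fun person => PySem.Set.ofList person) = s0 :: rest := hp
    rw [hmap]
    have hnd : ∀ s ∈ s0 :: rest, List.Nodup s := by
      rw [← hp]; exact pvPersons_nodup lines
    have hmc := pvMainCount s0 rest hnd
    simp only [zero_add]
    exact hmc.symm

-- ===== VERDICT (by name: the statement is the Claim_ definition above) =====
theorem count_all_yes_spec : Claim_equal_count_all_yes := by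
  intro g _
  show count_all_yes g = count_all_yes_alt g
  unfold count_all_yes count_all_yes_alt
  exact pvMain _
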